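-- pv_equiv track=rewrite | github.com/pappar-delle/AI-Labs-2022-23 | Crossword/Crossword1.py | makeSymm
-- ===== SOURCE A (Python) =====
-- def setIndex(board, ind, char):
--     if board == "":
--         return board
--     if board[ind] == char:
--         return board
--     if board[ind] in ('#'):
--         return ""
--     return board[:ind] + char + board[ind + 1:]
--
-- def makeSymm(board):
--     length = len(board)
--     for index in range(length):
--         if board[index] == '-' and board[length - 1 - index] == '#':
--             board = setIndex(board, index, '#')
--         elif board[index] == '#' and board[length - 1 - index] == 'L':
--             return ""
--     return board
-- ===== SOURCE B (Python) =====
-- def makeSymm(board):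
--     n = len(board)
--     out = list(board)
--     for i in range(n // 2):
--         a, b = board[i], board[n - 1 - i]
--         if (a == '#' and b == 'L') or (b == '#' and a == 'L'):
--             return ""
--         if a == '-' and b == '#':
--             out[i] = '#'
--         if b == '-' and a == '#':
--             out[n - 1 - i] = '#'
--     return "".join(out)
-- ===== Notes on version B (the rewrite author's own statement) =====
-- stated objective: alternative
-- what changed: Instead of a full-length scan that repeatedly rebuilds the string by slicing (setIndex) on a mutating board, B does a single half-length two-pointer pass over the ORIGINAL characters, checking both mirror directions per pair and writing into a char list joined once at the end.
import Mathlib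
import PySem

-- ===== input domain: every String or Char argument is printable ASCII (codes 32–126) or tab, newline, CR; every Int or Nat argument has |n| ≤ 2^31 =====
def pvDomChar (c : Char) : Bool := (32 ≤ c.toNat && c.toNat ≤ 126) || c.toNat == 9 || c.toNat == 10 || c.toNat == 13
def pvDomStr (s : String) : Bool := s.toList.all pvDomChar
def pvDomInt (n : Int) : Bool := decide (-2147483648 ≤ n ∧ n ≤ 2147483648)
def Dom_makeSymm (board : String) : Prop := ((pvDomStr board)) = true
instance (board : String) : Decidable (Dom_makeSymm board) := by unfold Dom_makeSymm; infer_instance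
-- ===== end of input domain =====

-- B replaces A's full scan over a mutating, slice-rebuilt string by one half-length
-- two-pointer pass over the original characters, writing into a char list joined once.

-- ===== PORT A =====
-- literal port of setIndex; works on the board as a list of chars
def setIndexA (b : List Char) (ind : Int) (ch : Char) : List Char :=
  if b = [] then b
  else
    match PySem.List.pyGet? b ind with
    | none => b   -- Python would raise IndexError here; never reached for the in-range indices makeSymm passes
    | some x =>
      if x = ch then b
      else if x = '#' then []
      else PySem.List.slice b none (some ind) ++ [ch] ++ PySem.List.slice b (some (ind + 1)) none

-- the for-loop of A: structural recursion over the index list, board as state, none = early `return ""`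
def makeSymmGo (n : Int) : List Int → List Char → Option (List Char)
  | [], b => some b
  | i :: rest, b =>
    if PySem.List.pyGet? b i = some '-' ∧ PySem.List.pyGet? b (n - 1 - i) = some '#' then
      makeSymmGo n rest (setIndexA b i '#')
    else if PySem.List.pyGet? b i = some '#' ∧ PySem.List.pyGet? b (n - 1 - i) = some 'L' then
      none
    else
      makeSymmGo n rest b

def makeSymm (board : String) : String :=
  let bs := board.toList
  let n : Int := (bs.length : Int)
  match makeSymmGo n (PySem.List.pyRange 0 n 1) bs with
  | none => ""
  | some b => String.mk b

-- ===== PORT B =====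
-- the for-loop of B: half-range two-pointer pass reading the original chars o, writing into out
def makeSymmAltGo (o : List Char) (n : Nat) : List Nat → List Char → Option (List Char)
  | [], out => some out
  | i :: rest, out =>
    let a := o.getD i ' '
    let b := o.getD (n - 1 - i) ' '
    if (a = '#' ∧ b = 'L') ∨ (b = '#' ∧ a = 'L') then none
    else
      let out1 := if a = '-' ∧ b = '#' then out.set i '#' else out
      let out2 := if b = '-' ∧ a = '#' then out1.set (n - 1 - i) '#' else out1
      makeSymmAltGo o n rest out2

def makeSymm_alt (board : String) : String :=
  let o := board.toList
  let n := o.length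
  match makeSymmAltGo o n (List.range (n / 2)) o with
  | none => ""
  | some out => String.mk out

-- ===== PRECONDITION & SPEC =====
def Spec_makeSymm (board : String) (out : String) : Prop := out = makeSymm_alt board
instance (board : String) (out : String) : Decidable (Spec_makeSymm board out) := by unfold Spec_makeSymm; infer_instance

-- ===== CLAIM (what is proved, stated in full; the proofs are below) =====
def Claim_equal_makeSymm : Prop := ∀ (board : String), Dom_makeSymm board → Spec_makeSymm board (makeSymm board)

-- ===== LEMMAS AND PROOFS =====

-- the value the mirroring produces at index i (computed from the original chars o)
def pvF (o : List Char) (i : Nat) : Char :=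
  if o.getD i ' ' = '-' ∧ o.getD (o.length - 1 - i) ' ' = '#' then '#' else o.getD i ' '

-- the fully mirrored board
def pvT (o : List Char) : List Char := (List.range o.length).map (pvF o)

-- abbreviations (plain defeq formulas, decidable by the Nat bounded-∃ instances):
-- pvBadA: "some pair is ('#','L') in that order" — makes A return ""
-- pvBadB: the symmetric pair condition B tests on the first half
@[reducible] def pvBadA (o : List Char) : Prop :=
  ∃ i, i < o.length ∧ o.getD i ' ' = '#' ∧ o.getD (o.length - 1 - i) ' ' = 'L'

@[reducible] def pvBadB (o : List Char) : Prop :=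
  ∃ i, i < o.length / 2 ∧
    ((o.getD i ' ' = '#' ∧ o.getD (o.length - 1 - i) ' ' = 'L') ∨
     (o.getD (o.length - 1 - i) ' ' = '#' ∧ o.getD i ' ' = 'L'))

lemma length_pvT (o : List Char) : (pvT o).length = o.length := by
  simp [pvT]

lemma getD_set_lt (l : List Char) (i j : Nat) (c : Char) (hj : j < l.length) :
    (l.set i c).getD j ' ' = if i = j then c else l.getD j ' ' := by
  rw [List.getD_eq_getElem _ _ (by simpa using hj), List.getElem_set,
    List.getD_eq_getElem _ _ hj]

lemma setIndexA_set (b : List Char) (k : Nat) (hk : k < b.length) (hne : b.getD k ' ' ≠ '#') :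
    setIndexA b (k : Int) '#' = b.set k '#' := by
  have hb : b ≠ [] := by
    intro h; subst h; simp at hk
  have hget : PySem.List.pyGet? b (k : Int) = some b[k] := by
    simp [PySem.List.pyGet?_natCast, List.getElem?_eq_getElem, hk]
  have hbk : b.getD k ' ' = b[k] := List.getD_eq_getElem b ' ' hk
  rw [hbk] at hne
  have h1 : PySem.List.slice b none (some (k : Int)) = b.take k := PySem.List.slice_to_natCast ..
  have h2 : PySem.List.slice b (some ((k : Int) + 1)) none = b.drop (k + 1) := by
    have h3 : ((k : Int) + 1) = ((k + 1 : Nat) : Int) := by push_cast; ring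
    rw [h3, PySem.List.slice_from_natCast]
  unfold setIndexA
  rw [if_neg hb, hget]
  simp only [if_neg hne, h1, h2, List.set_eq_take_cons_drop _ hk]
  simp

-- the invariant characterization of A's loop from position k on
lemma A_go_char (o : List Char) (k : Nat) (b : List Char)
    (hk : k ≤ o.length) (hb : b.length = o.length)
    (hinv : ∀ i, i < o.length → b.getD i ' ' = if i < k then pvF o i else o.getD i ' ') :
    makeSymmGo (o.length : Int) (PySem.List.pyRange (k : Int) (o.length : Int) 1) b
      = if ∃ i, i < o.length ∧ k ≤ i ∧ o.getD i ' ' = '#' ∧ o.getD (o.length - 1 - i) ' ' = 'L'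
        then none else some (pvT o) := by
  induction hm : o.length - k generalizing k b with
  | zero =>
    have hkn : k = o.length := by omega
    subst hkn
    rw [PySem.List.pyRange_one_eq_nil (le_refl _),
      if_neg (by rintro ⟨i, h1, h2, _⟩; omega)]
    show some b = some (pvT o)
    congr 1
    apply List.ext_getElem (by rw [hb, length_pvT])
    intro i h1 h2
    have hi : i < o.length := by omega
    have hvi := hinv i hi
    rw [if_pos hi] at hvi
    rw [← List.getD_eq_getElem b ' ' h1, hvi]
    simp [pvT, hi]
  | succ m ih =>
    have hkn : k < o.length := by omega
    have hbl : k < b.length := by omega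
    have hjn : o.length - 1 - k < o.length := by omega
    have hjb : o.length - 1 - k < b.length := by omega
    rw [PySem.List.pyRange_one_cons (by exact_mod_cast hkn),
      show (k : Int) + 1 = ((k + 1 : Nat) : Int) by push_cast; ring]
    have e1 : PySem.List.pyGet? b (k : Int) = some (b.getD k ' ') := by
      simp [PySem.List.pyGet?_natCast, List.getElem?_eq_getElem, hbl,
        List.getD_eq_getElem b ' ' hbl]
    have eidx : (o.length : Int) - 1 - (k : Int) = ((o.length - 1 - k : Nat) : Int) := by omega
    have e2 : PySem.List.pyGet? b ((o.length - 1 - k : Nat) : Int)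
        = some (b.getD (o.length - 1 - k) ' ') := by
      simp [PySem.List.pyGet?_natCast, List.getElem?_eq_getElem, hjb,
        List.getD_eq_getElem b ' ' hjb]
    have hbk : b.getD k ' ' = o.getD k ' ' := by
      have := hinv k hkn; rwa [if_neg (by omega)] at this
    have hbj : b.getD (o.length - 1 - k) ' '
        = if o.length - 1 - k < k then pvF o (o.length - 1 - k)
          else o.getD (o.length - 1 - k) ' ' := hinv _ hjn
    have hjj : o.length - 1 - (o.length - 1 - k) = k := by omega
    have C1 : (b.getD k ' ' = '-' ∧ b.getD (o.length - 1 - k) ' ' = '#')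
        ↔ (o.getD k ' ' = '-' ∧ o.getD (o.length - 1 - k) ' ' = '#') := by
      rw [hbk, hbj]
      by_cases hjk : o.length - 1 - k < k
      · rw [if_pos hjk]
        unfold pvF
        rw [hjj]
        by_cases h1 : o.getD k ' ' = '-'
        · rw [if_neg (by rintro ⟨_, hc⟩; rw [h1] at hc; exact absurd hc (by decide))]
        · constructor <;> (rintro ⟨ha, _⟩; exact absurd ha h1)
      · rw [if_neg hjk]
    have C2 : (b.getD k ' ' = '#' ∧ b.getD (o.length - 1 - k) ' ' = 'L')
        ↔ (o.getD k ' ' = '#' ∧ o.getD (o.length - 1 - k) ' ' = 'L') := by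
      rw [hbk, hbj]
      by_cases hjk : o.length - 1 - k < k
      · rw [if_pos hjk]
        unfold pvF
        rw [hjj]
        by_cases hc : o.getD (o.length - 1 - k) ' ' = '-' ∧ o.getD k ' ' = '#'
        · rw [if_pos hc]
          constructor
          · rintro ⟨_, h2⟩; exact absurd h2 (by decide)
          · rintro ⟨_, h2⟩; exact absurd hc.1 (by rw [h2]; decide)
        · rw [if_neg hc]
      · rw [if_neg hjk]
    simp only [makeSymmGo, eidx, e1, e2, Option.some.injEq]
    by_cases hc1 : o.getD k ' ' = '-' ∧ o.getD (o.length - 1 - k) ' ' = '#'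
    · rw [if_pos (C1.mpr hc1)]
      rw [setIndexA_set b k hbl (by rw [hbk, hc1.1]; decide)]
      rw [ih (k + 1) (b.set k '#') (by omega) (by simpa using hb) ?_ (by omega)]
      · refine if_congr ⟨?_, ?_⟩ rfl rfl
        · rintro ⟨i, h1, h2, h3⟩; exact ⟨i, h1, by omega, h3⟩
        · rintro ⟨i, h1, h2, h3, h4⟩
          have hik : k + 1 ≤ i := by
            rcases Nat.eq_or_lt_of_le h2 with he | hlt
            · exfalso; rw [← he, hc1.1] at h3; exact absurd h3 (by decide)
            · omega
          exact ⟨i, h1, hik, h3, h4⟩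
      · intro i hi
        rw [getD_set_lt b k i '#' (by omega)]
        by_cases hik : i = k
        · rw [if_pos hik.symm, hik, if_pos (by omega)]
          unfold pvF
          rw [if_pos hc1]
        · rw [if_neg (fun hh => hik hh.symm)]
          have := hinv i hi
          by_cases hl : i < k
          · rw [if_pos hl] at this; rw [this, if_pos (by omega)]
          · rw [if_neg hl] at this; rw [this, if_neg (by omega)]
    · by_cases hc2 : o.getD k ' ' = '#' ∧ o.getD (o.length - 1 - k) ' ' = 'L'
      · rw [if_neg (fun h => hc1 (C1.mp h)), if_pos (C2.mpr hc2),
          if_pos ⟨k, hkn, le_refl k, hc2⟩]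
      · rw [if_neg (fun h => hc1 (C1.mp h)), if_neg (fun h => hc2 (C2.mp h))]
        rw [ih (k + 1) b (by omega) hb ?_ (by omega)]
        · refine if_congr ⟨?_, ?_⟩ rfl rfl
          · rintro ⟨i, h1, h2, h3⟩; exact ⟨i, h1, by omega, h3⟩
          · rintro ⟨i, h1, h2, h3, h4⟩
            have hik2 : k + 1 ≤ i := by
              rcases Nat.eq_or_lt_of_le h2 with he | hlt
              · exfalso; subst he; exact hc2 ⟨h3, h4⟩
              · omega
            exact ⟨i, h1, hik2, h3, h4⟩
        · intro i hi
          have := hinv i hi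
          by_cases hik : i = k
          · subst hik
            rw [if_neg (by omega)] at this
            rw [this, if_pos (by omega)]
            unfold pvF
            rw [if_neg hc1]
          · by_cases hl : i < k
            · rw [if_pos hl] at this; rw [this, if_pos (by omega)]
            · rw [if_neg hl] at this; rw [this, if_neg (by omega)]


lemma A_char (board : String) :
    makeSymm board = if pvBadA board.toList then "" else String.mk (pvT board.toList) := by
  simp only [makeSymm]
  rw [show (0 : Int) = ((0 : Nat) : Int) by norm_num,
    A_go_char board.toList 0 board.toList (by omega) rfl (by intro i hi; rw [if_neg (by omega)])]
  have hiff : (∃ i, i < board.toList.length ∧ 0 ≤ i ∧ board.toList.getD i ' ' = '#' ∧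
      board.toList.getD (board.toList.length - 1 - i) ' ' = 'L') ↔ pvBadA board.toList := by
    unfold pvBadA
    constructor
    · rintro ⟨i, h1, _, h3⟩; exact ⟨i, h1, h3⟩
    · rintro ⟨i, h1, h3⟩; exact ⟨i, h1, Nat.zero_le i, h3⟩
  by_cases h : pvBadA board.toList
  · rw [if_pos (hiff.mpr h), if_pos h]
  · rw [if_neg (fun hx => h (hiff.mp hx)), if_neg h]

-- the invariant characterization of B's loop from position k on
lemma B_go_char (o : List Char) (k : Nat) (out : List Char)
    (hk : k ≤ o.length / 2) (hb : out.length = o.length)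
    (hinv : ∀ i, i < o.length →
      out.getD i ' ' = if i < k ∨ o.length - 1 - i < k then pvF o i else o.getD i ' ') :
    makeSymmAltGo o o.length (List.range' k (o.length / 2 - k)) out
      = if ∃ i, i < o.length / 2 ∧ k ≤ i ∧
            ((o.getD i ' ' = '#' ∧ o.getD (o.length - 1 - i) ' ' = 'L') ∨
             (o.getD (o.length - 1 - i) ' ' = '#' ∧ o.getD i ' ' = 'L'))
        then none else some (pvT o) := by
  induction hm : o.length / 2 - k generalizing k out with
  | zero =>
    have hkn : k = o.length / 2 := by omega
    rw [List.range'_zero, if_neg (by rintro ⟨i, h1, h2, _⟩; omega)]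
    show some out = some (pvT o)
    congr 1
    apply List.ext_getElem (by rw [hb, length_pvT])
    intro i h1 h2
    have hi : i < o.length := by omega
    have hthis := hinv i hi
    rw [← List.getD_eq_getElem out ' ' h1, hthis]
    subst hkn
    by_cases hc : i < o.length / 2 ∨ o.length - 1 - i < o.length / 2
    · rw [if_pos hc]; simp [pvT, hi]
    · rw [if_neg hc]
      have hii : o.length - 1 - i = i := by omega
      have : pvF o i = o.getD i ' ' := by
        unfold pvF
        rw [hii, if_neg (by rintro ⟨ha, hb2⟩; rw [ha] at hb2; exact absurd hb2 (by decide))]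
      rw [← this]; simp [pvT, hi]
  | succ m ih =>
    have hkn : k < o.length / 2 := by omega
    have hkn2 : k < o.length - 1 - k := by omega
    have hkl : k < o.length := by omega
    have hjl : o.length - 1 - k < o.length := by omega
    rw [List.range'_succ]
    simp only [makeSymmAltGo]
    by_cases hbad : (o.getD k ' ' = '#' ∧ o.getD (o.length - 1 - k) ' ' = 'L') ∨
        (o.getD (o.length - 1 - k) ' ' = '#' ∧ o.getD k ' ' = 'L')
    · rw [if_pos hbad, if_pos ⟨k, hkn, le_refl k, hbad⟩]
    · rw [if_neg hbad]
      set o1 : List Char := if o.getD k ' ' = '-' ∧ o.getD (o.length - 1 - k) ' ' = '#'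
        then out.set k '#' else out with ho1
      set o2 : List Char := if o.getD (o.length - 1 - k) ' ' = '-' ∧ o.getD k ' ' = '#'
        then o1.set (o.length - 1 - k) '#' else o1 with ho2
      have hl1 : o1.length = o.length := by
        rw [ho1]; split <;> simp [hb]
      have hl2 : o2.length = o.length := by
        rw [ho2]; split <;> simp [hl1]
      have houtk : out.getD k ' ' = o.getD k ' ' := by
        have := hinv k hkl; rwa [if_neg (by omega)] at this
      have houtj : out.getD (o.length - 1 - k) ' ' = o.getD (o.length - 1 - k) ' ' := by
        have := hinv _ hjl
        rwa [if_neg (by omega)] at this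
      have hjj : o.length - 1 - (o.length - 1 - k) = k := by omega
      have E1 : ∀ j, j < o.length → o1.getD j ' ' = if j = k then pvF o k else out.getD j ' ' := by
        intro j hj
        rw [ho1]
        by_cases hc : o.getD k ' ' = '-' ∧ o.getD (o.length - 1 - k) ' ' = '#'
        · rw [if_pos hc, getD_set_lt out k j '#' (by omega)]
          by_cases hjk : j = k
          · rw [if_pos (by omega : k = j), if_pos hjk]
            unfold pvF
            rw [if_pos hc]
          · rw [if_neg (by omega : ¬ k = j), if_neg hjk]
        · rw [if_neg hc]
          by_cases hjk : j = k
          · subst hjk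
            rw [if_pos rfl]
            unfold pvF
            rw [if_neg hc, houtk]
          · rw [if_neg hjk]
      have E2 : ∀ j, j < o.length →
          o2.getD j ' ' = if j = o.length - 1 - k then pvF o (o.length - 1 - k)
            else o1.getD j ' ' := by
        intro j hj
        rw [ho2]
        by_cases hc : o.getD (o.length - 1 - k) ' ' = '-' ∧ o.getD k ' ' = '#'
        · rw [if_pos hc, getD_set_lt o1 (o.length - 1 - k) j '#' (by omega)]
          by_cases hjk : j = o.length - 1 - k
          · rw [if_pos (by omega : o.length - 1 - k = j), if_pos hjk]
            unfold pvF
            rw [hjj, if_pos hc]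
          · rw [if_neg (by omega : ¬ o.length - 1 - k = j), if_neg hjk]
        · rw [if_neg hc]
          by_cases hjk : j = o.length - 1 - k
          · subst hjk
            rw [if_pos rfl, E1 _ hj, if_neg (by omega), houtj]
            unfold pvF
            rw [hjj, if_neg hc]
          · rw [if_neg hjk]
      rw [ih (k + 1) o2 (by omega) hl2 ?_ (by omega)]
      · refine if_congr ⟨?_, ?_⟩ rfl rfl
        · rintro ⟨i, h1, h2, h3⟩; exact ⟨i, h1, by omega, h3⟩
        · rintro ⟨i, h1, h2, h3⟩
          have hik : k + 1 ≤ i := by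
            rcases Nat.eq_or_lt_of_le h2 with he | hlt
            · exfalso; subst he; exact hbad h3
            · omega
          exact ⟨i, h1, hik, h3⟩
      · intro i hi
        rw [E2 i hi]
        by_cases h : i = o.length - 1 - k
        · subst h
          rw [if_pos rfl, if_pos (by omega :
              o.length - 1 - k < k + 1 ∨ o.length - 1 - (o.length - 1 - k) < k + 1)]
        · rw [if_neg h, E1 i hi]
          by_cases h2 : i = k
          · rw [if_pos h2, h2, if_pos (by omega : k < k + 1 ∨ o.length - 1 - k < k + 1)]
          · rw [if_neg h2, hinv i hi]
            exact if_congr (by omega) rfl rfl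

lemma B_char (board : String) :
    makeSymm_alt board = if pvBadB board.toList then "" else String.mk (pvT board.toList) := by
  simp only [makeSymm_alt]
  rw [List.range_eq_range']
  conv_lhs => rw [show board.toList.length / 2 = board.toList.length / 2 - 0 from rfl]
  rw [B_go_char board.toList 0 board.toList (by omega) rfl
      (by intro i hi; rw [if_neg (by omega)])]
  have hiff : (∃ i, i < board.toList.length / 2 ∧ 0 ≤ i ∧
      ((board.toList.getD i ' ' = '#' ∧ board.toList.getD (board.toList.length - 1 - i) ' ' = 'L') ∨
       (board.toList.getD (board.toList.length - 1 - i) ' ' = '#' ∧ board.toList.getD i ' ' = 'L')))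
      ↔ pvBadB board.toList := by
    unfold pvBadB
    constructor
    · rintro ⟨i, h1, _, h3⟩; exact ⟨i, h1, h3⟩
    · rintro ⟨i, h1, h3⟩; exact ⟨i, h1, Nat.zero_le i, h3⟩
  by_cases h : pvBadB board.toList
  · rw [if_pos (hiff.mpr h), if_pos h]
  · rw [if_neg (fun hx => h (hiff.mp hx)), if_neg h]

lemma bad_iff (o : List Char) : pvBadA o ↔ pvBadB o := by
  unfold pvBadA pvBadB
  constructor
  · rintro ⟨i, hin, h1, h2⟩
    by_cases hi : i < o.length / 2
    · exact ⟨i, hi, Or.inl ⟨h1, h2⟩⟩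
    · have hne : i ≠ o.length - 1 - i := by
        intro he
        rw [← he, h1] at h2
        exact absurd h2 (by decide)
      refine ⟨o.length - 1 - i, by omega, Or.inr ⟨?_, h2⟩⟩
      rwa [show o.length - 1 - (o.length - 1 - i) = i by omega]
  · rintro ⟨j, hj, hcase⟩
    rcases hcase with ⟨h1, h2⟩ | ⟨h1, h2⟩
    · exact ⟨j, by omega, h1, h2⟩
    · refine ⟨o.length - 1 - j, by omega, h1, ?_⟩
      rwa [show o.length - 1 - (o.length - 1 - j) = j by omega]

-- ===== VERDICT (by name: the statement is the Claim_ definition above) =====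
theorem makeSymm_spec : Claim_equal_makeSymm := by
  intro board _
  unfold Spec_makeSymm
  rw [A_char, B_char, if_congr (bad_iff board.toList) rfl rfl]
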